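-- pv_equiv track=rewrite | github.com/Soufiane-Barrada/Query-Partitioning-VLDB | duckdb_profiler/duckdb_planbench/collector.py | _resolve_tokens_against_child
-- ===== SOURCE A (Python) =====
-- from typing import Any, Dict, List, Optional, Union, Set
--
-- def _flat_lineage(child_slots: List[List[str]]) -> List[str]:
--     seen = set()
--     out = []
--     for lst in child_slots or []:
--         for c in lst or []:
--             if c not in seen:
--                 seen.add(c)
--                 out.append(c)
--     return out
--
-- def _resolve_tokens_against_child(names: List[str], child_slots: List[List[str]]) -> List[str]:
--     if not names:
--         return []
--     # flatten child lineage into a stable list of fully-qualified base columns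
--     base_cols = _flat_lineage(child_slots)
--     # build tail -> [fully.qualified] map preserving order
--     suffix_map: Dict[str, List[str]] = {}
--     for bc in base_cols:
--         tail = str(bc).split(".")[-1]
--         suffix_map.setdefault(tail, []).append(bc)
--
--     out: List[str] = []
--     seen: set = set()
--     for tok in names:
--         tail = str(tok).lower().split(".")[-1]
--         hits = suffix_map.get(tail, [])
--         if len(hits) == 1:
--             # emit the fully-qualified base col
--             h = hits[0]
--             if h not in seen:
--                 seen.add(h)
--                 out.append(h)
--         elif len(hits) > 1:
--             # if ambiguous: emit all fully-qualified candidates (not the raw token)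
--             for h in hits:
--                 if h not in seen:
--                     seen.add(h)
--                     out.append(h)
--         # if no hits, emit nothing (don’t push the bare token)
--
--     return out
-- ===== SOURCE B (Python) =====
-- def _resolve_tokens_against_child(names, child_slots):
--     # ordered, deduped base columns (dict.fromkeys keeps first occurrences)
--     base_cols = list(dict.fromkeys(c for lst in (child_slots or []) for c in (lst or [])))
--     out = []
--     seen = set()
--     for tok in names:
--         tail = str(tok).lower().split(".")[-1]
--         for bc in base_cols:
--             if str(bc).split(".")[-1] == tail and bc not in seen:
--                 seen.add(bc)
--                 out.append(bc)
--     return out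
-- ===== Notes on version B (the rewrite author's own statement) =====
-- stated objective: simpler
-- what changed: Drops the suffix_map dict and the len==1/len>1 branching: B flattens the child lineage via dict.fromkeys and, per token, collects matching base columns in one scan with a seen-set, which emits exactly the same hits in the same order.
import Mathlib
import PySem

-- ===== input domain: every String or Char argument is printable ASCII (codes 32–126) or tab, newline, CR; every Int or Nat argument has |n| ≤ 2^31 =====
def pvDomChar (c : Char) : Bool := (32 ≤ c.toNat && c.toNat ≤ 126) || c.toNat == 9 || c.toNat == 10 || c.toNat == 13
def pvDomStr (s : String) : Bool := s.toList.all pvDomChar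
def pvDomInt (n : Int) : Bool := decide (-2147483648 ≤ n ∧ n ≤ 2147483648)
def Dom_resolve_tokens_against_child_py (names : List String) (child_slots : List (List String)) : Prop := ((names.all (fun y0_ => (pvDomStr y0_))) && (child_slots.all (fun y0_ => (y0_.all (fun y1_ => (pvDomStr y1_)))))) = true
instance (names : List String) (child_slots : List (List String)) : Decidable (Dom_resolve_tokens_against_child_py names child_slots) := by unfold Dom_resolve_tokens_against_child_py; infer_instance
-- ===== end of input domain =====

-- B replaces A's suffix_map dict and its len==1/len>1 branching by a single per-token scan of the
-- deduped base-column list (objective: simpler).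

-- tail of s.split("."): split('.') always returns a nonempty list, so Python's [-1] is getLastD
def pvTail (s : String) : String := ((PySem.Str.split? s ".").getD []).getLastD ""
-- str(tok).lower().split(".")[-1]
def pvTailLower (s : String) : String := pvTail (PySem.Str.lower s)

-- the shared 'if x not in seen: seen.add(x); out.append(x)' step (state = (seen, out))
def pvEmit (st : PySem.Set String × List String) (h : String) : PySem.Set String × List String :=
  if PySem.Set.contains st.1 h then st else (PySem.Set.add st.1 h, st.2 ++ [h])

-- ===== PORT A =====
def resolve_tokens_against_child_py (names : List String) (child_slots : List (List String)) : List String :=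
  if names = [] then []
  else
    -- _flat_lineage
    let fl := child_slots.foldl
      (fun (st : PySem.Set String × List String) lst => lst.foldl pvEmit st) ([], [])
    let base_cols := fl.2
    -- suffix_map: setdefault(tail, []).append(bc)
    let suffix_map := base_cols.foldl
      (fun (d : PySem.Dict String (List String)) bc =>
        d.insert (pvTail bc) (d.getD (pvTail bc) [] ++ [bc])) PySem.Dict.empty
    let fin := names.foldl
      (fun (st : PySem.Set String × List String) tok =>
        let hits := suffix_map.getD (pvTailLower tok) []
        if hits.length = 1 then
          pvEmit st (hits.headD "")    -- hits[0]; hits is nonempty in this branch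
        else if hits.length > 1 then
          hits.foldl pvEmit st
        else st) ([], [])
    fin.2

-- ===== PORT B =====
def resolve_tokens_against_child_py_alt (names : List String) (child_slots : List (List String)) : List String :=
  -- list(dict.fromkeys(flattened)) = ordered dedup
  let base_cols := PySem.List.dedup (child_slots.flatMap (fun l => l))
  (names.foldl
    (fun (st : PySem.Set String × List String) tok =>
      let tail := pvTailLower tok
      base_cols.foldl
        (fun st bc =>
          if pvTail bc == tail && !(PySem.Set.contains st.1 bc)
          then (PySem.Set.add st.1 bc, st.2 ++ [bc]) else st) st)
    ([], [])).2

-- ===== PRECONDITION & SPEC =====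
def Spec_resolve_tokens_against_child_py (names : List String) (child_slots : List (List String)) (out : List String) : Prop := out = resolve_tokens_against_child_py_alt names child_slots
instance (names : List String) (child_slots : List (List String)) (out : List String) : Decidable (Spec_resolve_tokens_against_child_py names child_slots out) := by unfold Spec_resolve_tokens_against_child_py; infer_instance

-- ===== CLAIM (what is proved, stated in full; the proofs are below) =====
def Claim_equal_resolve_tokens_against_child_py : Prop := ∀ (names : List String) (child_slots : List (List String)), Dom_resolve_tokens_against_child_py names child_slots → Spec_resolve_tokens_against_child_py names child_slots (resolve_tokens_against_child_py names child_slots)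

-- ===== LEMMAS AND PROOFS =====

-- pvEmit preserves 'seen = out' and acts as Set.add on both components
theorem pvEmit_diag (s : PySem.Set String) (h : String) :
    pvEmit (s, s) h = (PySem.Set.add s h, PySem.Set.add s h) := by
  by_cases hc : h ∈ s <;> simp [pvEmit, PySem.Set.add, hc]

theorem foldl_pvEmit_diag (l : List String) (s : PySem.Set String) :
    l.foldl pvEmit (s, s) = (l.foldl PySem.Set.add s, l.foldl PySem.Set.add s) := by
  induction l generalizing s with
  | nil => rfl
  | cons a t ih => simp [List.foldl_cons, pvEmit_diag, ih]

-- A's _flat_lineage equals B's dedup of the flattened lineage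
theorem flat_lineage_eq (cs : List (List String)) (s : PySem.Set String) :
    cs.foldl (fun (st : PySem.Set String × List String) lst => lst.foldl pvEmit st) (s, s)
      = (cs.foldl (fun s lst => lst.foldl PySem.Set.add s) s,
         cs.foldl (fun s lst => lst.foldl PySem.Set.add s) s) := by
  induction cs generalizing s with
  | nil => rfl
  | cons l t ih => simp [List.foldl_cons, foldl_pvEmit_diag, ih]

theorem ofList_flatMap (cs : List (List String)) (s : PySem.Set String) :
    (cs.flatMap (fun l => l)).foldl PySem.Set.add s
      = cs.foldl (fun s lst => lst.foldl PySem.Set.add s) s := by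
  induction cs generalizing s with
  | nil => rfl
  | cons l t ih => rw [List.flatMap_cons, List.foldl_append, ih, List.foldl_cons]

-- the suffix map looks up exactly the matching base cols, in order
theorem suffix_map_getD (bcs : List String) (d : PySem.Dict String (List String)) (t : String) :
    (bcs.foldl (fun d bc => d.insert (pvTail bc) (d.getD (pvTail bc) [] ++ [bc])) d).getD t []
      = d.getD t [] ++ bcs.filter (fun bc => pvTail bc == t) := by
  induction bcs generalizing d with
  | nil => simp
  | cons bc rest ih =>
      simp only [List.foldl_cons, ih, List.filter_cons, PySem.Dict.getD_insert]
      by_cases he : t = pvTail bc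
      · rw [he]; simp
      · have hb : (pvTail bc == t) = false := by
          simp only [beq_eq_false_iff_ne, ne_eq]
          exact fun h => he h.symm
        simp [he, hb]

-- the generic 'guarded loop = loop over the filter' shape
theorem foldl_guard_filter {α σ : Type} (p : α → Bool) (f : σ → α → σ)
    (l : List α) (st : σ) :
    l.foldl (fun st x => if p x then f st x else st) st
      = (l.filter p).foldl f st := by
  induction l generalizing st with
  | nil => rfl
  | cons a rest ih =>
      by_cases hp : p a = true <;> simp [List.foldl_cons, hp, ih]

-- B's guarded scan over base_cols is pvEmit folded over the matching base cols
theorem b_inner_eq_filter (bcs : List String) (t : String) (st : PySem.Set String × List String) :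
    bcs.foldl
      (fun st bc =>
        if pvTail bc == t && !(PySem.Set.contains st.1 bc)
        then (PySem.Set.add st.1 bc, st.2 ++ [bc]) else st) st
      = (bcs.filter (fun bc => pvTail bc == t)).foldl pvEmit st := by
  rw [← foldl_guard_filter (fun bc => pvTail bc == t) pvEmit]
  apply PySem.List.foldl_congr_mem
  intro st bc _
  by_cases hp : (pvTail bc == t) = true <;> by_cases hc : bc ∈ st.1 <;>
    simp [pvEmit, hp, hc]

-- A's branching body is pvEmit folded over the hits list
theorem a_body_eq_fold (hits : List String) (st : PySem.Set String × List String) :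
    (if hits.length = 1 then pvEmit st (hits.headD "")
     else if hits.length > 1 then hits.foldl pvEmit st
     else st)
      = hits.foldl pvEmit st := by
  match hits with
  | [] => simp
  | [h] => simp
  | h1 :: h2 :: t => simp

theorem resolve_eq (names : List String) (child_slots : List (List String)) :
    resolve_tokens_against_child_py names child_slots
      = resolve_tokens_against_child_py_alt names child_slots := by
  by_cases hn : names = []
  · simp [resolve_tokens_against_child_py, resolve_tokens_against_child_py_alt, hn]
  · unfold resolve_tokens_against_child_py resolve_tokens_against_child_py_alt
    simp only [hn, if_false]
    have hflat : (child_slots.foldl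
        (fun (st : PySem.Set String × List String) lst => lst.foldl pvEmit st) ([], [])).2
        = PySem.List.dedup (child_slots.flatMap (fun l => l)) := by
      rw [flat_lineage_eq, PySem.List.dedup_eq_ofList, PySem.Set.ofList_eq_foldl,
        ofList_flatMap]
    rw [hflat]
    congr 1
    apply PySem.List.foldl_congr_mem
    intro st tok _
    rw [b_inner_eq_filter, suffix_map_getD, PySem.Dict.getD_empty]
    simp only [List.nil_append]
    exact a_body_eq_fold _ st

-- ===== VERDICT (by name: the statement is the Claim_ definition above) =====
theorem resolve_tokens_against_child_py_spec : Claim_equal_resolve_tokens_against_child_py := by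
  intro names child_slots _
  unfold Spec_resolve_tokens_against_child_py
  exact resolve_eq names child_slots
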